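-- pv_equiv track=rewrite | github.com/Vancouver-wen/Multi-Camera-Calibration | capture/MultiCapture.py | can_distinguish_cam_byname
-- ===== SOURCE A (Python) =====
-- def can_distinguish_cam_byname(camid_maps):
--     names=[]
--     for camid_map in camid_maps:
--         names.append(camid_map['name'])
--     names=list(set(names))
--     if len(names)==len(camid_maps):
--         return True
--     else:
--         return False
-- ===== SOURCE B (Python) =====
-- def can_distinguish_cam_byname(camid_maps):
--     seen = set()
--     for camid_map in camid_maps:
--         name = camid_map['name']
--         if name in seen:
--             return False
--         seen.add(name)
--     return True
-- ===== Notes on version B (the rewrite author's own statement) =====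
-- stated objective: simpler
-- what changed: B replaces A's build-all-names-then-set-then-length-comparison with a single incremental pass that tests each name against a growing seen set and returns False at the first duplicate.
import Mathlib
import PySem

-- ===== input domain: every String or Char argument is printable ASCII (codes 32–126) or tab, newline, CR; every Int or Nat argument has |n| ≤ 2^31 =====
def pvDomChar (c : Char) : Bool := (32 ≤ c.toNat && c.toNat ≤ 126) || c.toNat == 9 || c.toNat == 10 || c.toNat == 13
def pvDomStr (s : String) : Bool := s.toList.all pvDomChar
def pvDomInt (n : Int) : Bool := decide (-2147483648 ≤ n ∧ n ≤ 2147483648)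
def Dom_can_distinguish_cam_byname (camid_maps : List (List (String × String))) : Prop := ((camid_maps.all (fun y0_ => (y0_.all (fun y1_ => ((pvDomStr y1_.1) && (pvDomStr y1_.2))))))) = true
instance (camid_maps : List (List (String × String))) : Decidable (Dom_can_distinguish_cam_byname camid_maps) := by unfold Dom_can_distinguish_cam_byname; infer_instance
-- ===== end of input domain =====

-- ===== PORT A =====
-- B changes the decomposition: one early-exit pass with a growing seen-set instead of
-- A's collect-all-names, deduplicate, then compare-lengths; 'simpler', not claimed faster.
-- camid_map['name'] : first match in the association list; none = KeyError (excluded by Pre_)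
def pvLookupName (camid_map : List (String × String)) : Option String :=
  (camid_map.find? (fun p => p.1 == "name")).map (·.2)

-- A: names = []; for m in camid_maps: names.append(m['name']); names = list(set(names));
--    return True if len(names) == len(camid_maps) else False
def can_distinguish_cam_byname (camid_maps : List (List (String × String))) : Bool :=
  let names := camid_maps.foldl (fun acc m => acc ++ [pvLookupName m]) []
  let names := PySem.Set.ofList names
  if names.length = camid_maps.length then true else false

-- ===== PORT B =====
-- B: seen = set(); for m in camid_maps: n = m['name']; if n in seen: return False; seen.add(n); return True
def pvAltLoop (camid_maps : List (List (String × String))) (seen : PySem.Set (Option String)) : Bool :=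
  match camid_maps with
  | [] => true
  | m :: rest =>
    let n := pvLookupName m
    if PySem.Set.contains seen n then false
    else pvAltLoop rest (PySem.Set.add seen n)

def can_distinguish_cam_byname_alt (camid_maps : List (List (String × String))) : Bool :=
  pvAltLoop camid_maps PySem.Set.empty

-- ===== PRECONDITION & SPEC =====
-- Pre_ excludes exactly the inputs where some camid_map lacks the key 'name': there the
-- Python A (and B) raise KeyError instead of returning a bool.
def Pre_can_distinguish_cam_byname (camid_maps : List (List (String × String))) : Prop :=
  ∀ m ∈ camid_maps, "name" ∈ m.map Prod.fst
instance (camid_maps : List (List (String × String))) : Decidable (Pre_can_distinguish_cam_byname camid_maps) := by unfold Pre_can_distinguish_cam_byname; infer_instance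
def pvWitness_can_distinguish_cam_byname : (List (List (String × String))) :=
  [[("name", "cam0")], [("name", "cam1"), ("id", "7")]]

def Spec_can_distinguish_cam_byname (camid_maps : List (List (String × String))) (out : Bool) : Prop := out = can_distinguish_cam_byname_alt camid_maps
instance (camid_maps : List (List (String × String))) (out : Bool) : Decidable (Spec_can_distinguish_cam_byname camid_maps out) := by unfold Spec_can_distinguish_cam_byname; infer_instance

-- ===== CLAIM (what is proved, stated in full; the proofs are below) =====
def Claim_equal_can_distinguish_cam_byname : Prop := ∀ (camid_maps : List (List (String × String))), Dom_can_distinguish_cam_byname camid_maps → Pre_can_distinguish_cam_byname camid_maps → Spec_can_distinguish_cam_byname camid_maps (can_distinguish_cam_byname camid_maps)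

-- ===== LEMMAS AND PROOFS =====

-- A's append loop collects the mapped names in order
theorem pvFoldl_append_map (ms : List (List (String × String))) (acc : List (Option String)) :
    ms.foldl (fun acc m => acc ++ [pvLookupName m]) acc = acc ++ ms.map pvLookupName := by
  induction ms generalizing acc with
  | nil => simp
  | cons m rest ih => simp [List.foldl, ih]

-- adding one element grows a seen-set by at most one
theorem pvAdd_length_le {a : Type} [BEq a] (s : PySem.Set a) (x : a) :
    (PySem.Set.add s x).length ≤ s.length + 1 := by
  simp only [PySem.Set.add]
  split <;> simp

theorem pvFoldl_add_length_le {a : Type} [BEq a] (ns : List a) (s : PySem.Set a) :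
    (ns.foldl PySem.Set.add s).length ≤ s.length + ns.length := by
  induction ns generalizing s with
  | nil => simp
  | cons n rest ih =>
    calc ((n :: rest).foldl PySem.Set.add s).length
        = (rest.foldl PySem.Set.add (PySem.Set.add s n)).length := by simp [List.foldl]
      _ ≤ (PySem.Set.add s n).length + rest.length := ih _
      _ ≤ s.length + (n :: rest).length := by
          have := pvAdd_length_le s n; simp only [List.length_cons]; omega

-- the early-exit loop over names, abstracted from port B
def pvNameLoop {a : Type} [BEq a] (ns : List a) (seen : PySem.Set a) : Bool :=
  match ns with
  | [] => true
  | n :: rest => if PySem.Set.contains seen n then false else pvNameLoop rest (PySem.Set.add seen n)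

theorem pvAltLoop_eq_nameLoop (ms : List (List (String × String))) (seen : PySem.Set (Option String)) :
    pvAltLoop ms seen = pvNameLoop (ms.map pvLookupName) seen := by
  induction ms generalizing seen with
  | nil => rfl
  | cons m rest ih => simp [pvAltLoop, pvNameLoop, ih]

-- A's length test equals B's early-exit loop, for any starting seen-set
theorem pvKey {a : Type} [BEq a] (ns : List a) (s : PySem.Set a) :
    ((ns.foldl PySem.Set.add s).length = s.length + ns.length) ↔ pvNameLoop ns s = true := by
  induction ns generalizing s with
  | nil => simp [pvNameLoop]
  | cons n rest ih =>
    simp only [List.foldl, pvNameLoop, List.length_cons]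
    by_cases h : PySem.Set.contains s n = true
    · have hadd : PySem.Set.add s n = s := by
        simp only [PySem.Set.add]; rw [if_pos h]
      rw [hadd, if_pos h]
      have := pvFoldl_add_length_le rest s
      constructor
      · intro hl; omega
      · intro hfalse; exact absurd hfalse (by simp)
    · have hadd : (PySem.Set.add s n).length = s.length + 1 := by
        simp only [PySem.Set.add]
        rw [if_neg h]
        simp
      rw [if_neg h]
      have := ih (PySem.Set.add s n)
      rw [hadd] at this
      constructor
      · intro hl; exact this.mp (by omega)
      · intro ht; have := this.mpr ht; omega

-- ===== VERDICT (by name: the statement is the Claim_ definition above) =====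
theorem can_distinguish_cam_byname_spec : Claim_equal_can_distinguish_cam_byname := by
  intro camid_maps _ _
  unfold Spec_can_distinguish_cam_byname
  unfold can_distinguish_cam_byname can_distinguish_cam_byname_alt
  rw [pvAltLoop_eq_nameLoop]
  simp only [pvFoldl_append_map, List.nil_append, PySem.Set.ofList, PySem.Set.empty]
  have hk := pvKey (camid_maps.map pvLookupName) PySem.Set.empty
  simp only [PySem.Set.empty, List.length_nil, Nat.zero_add, List.length_map] at hk
  by_cases h : ((camid_maps.map pvLookupName).foldl PySem.Set.add []).length = camid_maps.length
  · rw [if_pos h]; exact (hk.mp h).symm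
  · rw [if_neg h]
    cases hb : pvNameLoop (camid_maps.map pvLookupName) [] with
    | true => exact absurd (hk.mpr hb) h
    | false => rfl
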